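-- pv_equiv track=rewrite | github.com/ayankilevich-cpu/reto-pipeline | Medios/ML/etiquetado_llm/analisis_predictores_odio.py | mapear_categoria
-- ===== SOURCE A (Python) =====
-- def mapear_categoria(cat: str) -> str:
--     """Mapea categoría de odio a categoría macro."""
--     cat = str(cat).lower()
--     if any(x in cat for x in ['xenofobia', 'inmigrante', 'moro', 'inmigra', 'extranjero']):
--         return 'Xenofobia/Antiinmigrantes'
--     elif any(x in cat for x in ['racis', 'negro', 'étnico', 'racial']):
--         return 'Racismo'
--     elif any(x in cat for x in ['homofob', 'gay', 'maric', 'lgbtq', 'orientación sexual']):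
--         return 'Homofobia/LGBTQ+'
--     elif any(x in cat for x in ['misoginia', 'sexis', 'género', 'feminista', 'mujer']):
--         return 'Misoginia/Sexismo'
--     elif any(x in cat for x in ['polític', 'ideológ', 'zurdo', 'facha', 'comunis']):
--         return 'Odio político/ideológico'
--     elif any(x in cat for x in ['muslim', 'islam', 'religión', 'judío']):
--         return 'Odio religioso'
--     elif any(x in cat for x in ['insult', 'hostilidad', 'no dirigido']):
--         return 'Insultos genéricos'
--     elif any(x in cat for x in ['capacit', 'discapacidad', 'retrasado', 'mental']):
--         return 'Capacitismo'
--     elif any(x in cat for x in ['nacionalidad', 'español', 'catalán', 'vasco']):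
--         return 'Nacionalismo/Regionalismo'
--     else:
--         return 'Otros'
-- ===== SOURCE B (Python) =====
-- GROUPS = [
--     ['xenofobia', 'inmigrante', 'moro', 'inmigra', 'extranjero'],
--     ['racis', 'negro', 'étnico', 'racial'],
--     ['homofob', 'gay', 'maric', 'lgbtq', 'orientación sexual'],
--     ['misoginia', 'sexis', 'género', 'feminista', 'mujer'],
--     ['polític', 'ideológ', 'zurdo', 'facha', 'comunis'],
--     ['muslim', 'islam', 'religión', 'judío'],
--     ['insult', 'hostilidad', 'no dirigido'],
--     ['capacit', 'discapacidad', 'retrasado', 'mental'],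
--     ['nacionalidad', 'español', 'catalán', 'vasco'],
-- ]
-- LABELS = ['Xenofobia/Antiinmigrantes', 'Racismo', 'Homofobia/LGBTQ+',
--           'Misoginia/Sexismo', 'Odio político/ideológico', 'Odio religioso',
--           'Insultos genéricos', 'Capacitismo', 'Nacionalismo/Regionalismo',
--           'Otros']
-- # flat keyword -> priority index (keywords are pairwise distinct)
-- KEYWORD_PRIO = {kw: p for p, kws in enumerate(GROUPS) for kw in kws}
--
--
-- def mapear_categoria(cat: str) -> str:
--     """Mapea categoría de odio a macro: mínima prioridad entre las palabras clave presentes."""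
--     cat = str(cat).lower()
--     best = min((p for kw, p in KEYWORD_PRIO.items() if kw in cat), default=len(GROUPS))
--     return LABELS[best]
-- ===== Notes on version B (the rewrite author's own statement) =====
-- stated objective: alternative
-- what changed: Instead of an ordered if/elif chain with early return, B builds a flat keyword-to-priority map, computes the minimum priority among all keywords occurring in the string (min with a default), and indexes a label table with it.
import Mathlib
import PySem

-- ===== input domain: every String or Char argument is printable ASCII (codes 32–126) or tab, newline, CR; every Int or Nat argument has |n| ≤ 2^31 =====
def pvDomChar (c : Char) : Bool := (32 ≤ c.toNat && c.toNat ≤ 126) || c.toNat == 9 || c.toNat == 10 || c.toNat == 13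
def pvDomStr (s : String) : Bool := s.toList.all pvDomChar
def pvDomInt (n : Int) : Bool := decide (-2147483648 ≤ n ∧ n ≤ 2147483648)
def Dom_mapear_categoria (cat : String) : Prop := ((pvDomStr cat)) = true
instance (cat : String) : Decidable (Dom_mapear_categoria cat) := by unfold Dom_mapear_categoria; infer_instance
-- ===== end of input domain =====

-- B replaces A's ordered if/elif chain by a flat keyword→priority table: it takes the
-- minimum priority among all keywords occurring in the string and indexes a label list
-- (objective: alternative algorithm, same cost).

-- ===== PORT A =====
def mapear_categoria (cat : String) : String :=
  let c := PySem.Str.lower cat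
  if (["xenofobia", "inmigrante", "moro", "inmigra", "extranjero"] : List String).any (fun x => PySem.Str.isIn x c) then
    "Xenofobia/Antiinmigrantes"
  else if (["racis", "negro", "étnico", "racial"] : List String).any (fun x => PySem.Str.isIn x c) then
    "Racismo"
  else if (["homofob", "gay", "maric", "lgbtq", "orientación sexual"] : List String).any (fun x => PySem.Str.isIn x c) then
    "Homofobia/LGBTQ+"
  else if (["misoginia", "sexis", "género", "feminista", "mujer"] : List String).any (fun x => PySem.Str.isIn x c) then
    "Misoginia/Sexismo"
  else if (["polític", "ideológ", "zurdo", "facha", "comunis"] : List String).any (fun x => PySem.Str.isIn x c) then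
    "Odio político/ideológico"
  else if (["muslim", "islam", "religión", "judío"] : List String).any (fun x => PySem.Str.isIn x c) then
    "Odio religioso"
  else if (["insult", "hostilidad", "no dirigido"] : List String).any (fun x => PySem.Str.isIn x c) then
    "Insultos genéricos"
  else if (["capacit", "discapacidad", "retrasado", "mental"] : List String).any (fun x => PySem.Str.isIn x c) then
    "Capacitismo"
  else if (["nacionalidad", "español", "catalán", "vasco"] : List String).any (fun x => PySem.Str.isIn x c) then
    "Nacionalismo/Regionalismo"
  else
    "Otros"

-- ===== PORT B =====
def pvGroups : List (List String) :=
  [["xenofobia", "inmigrante", "moro", "inmigra", "extranjero"],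
   ["racis", "negro", "étnico", "racial"],
   ["homofob", "gay", "maric", "lgbtq", "orientación sexual"],
   ["misoginia", "sexis", "género", "feminista", "mujer"],
   ["polític", "ideológ", "zurdo", "facha", "comunis"],
   ["muslim", "islam", "religión", "judío"],
   ["insult", "hostilidad", "no dirigido"],
   ["capacit", "discapacidad", "retrasado", "mental"],
   ["nacionalidad", "español", "catalán", "vasco"]]

def pvLabels : List String :=
  ["Xenofobia/Antiinmigrantes", "Racismo", "Homofobia/LGBTQ+", "Misoginia/Sexismo",
   "Odio político/ideológico", "Odio religioso", "Insultos genéricos", "Capacitismo",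
   "Nacionalismo/Regionalismo", "Otros"]

-- KEYWORD_PRIO = {kw: p for p, kws in enumerate(GROUPS) for kw in kws}  (keywords pairwise distinct)
def pvKwPrio : List (String × Int) :=
  (PySem.List.enumerate pvGroups 0).flatMap (fun pk => pk.2.map (fun kw => (kw, pk.1)))

def mapear_categoria_alt (cat : String) : String :=
  let c := PySem.Str.lower cat
  -- best = min((p for kw, p in KEYWORD_PRIO.items() if kw in cat), default=len(GROUPS))
  let best : Int :=
    match PySem.List.min? (pvKwPrio.filterMap
        (fun kp => if PySem.Str.isIn kp.1 c then some kp.2 else none)) (fun p => p) with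
    | some m => m
    | none => (pvGroups.length : Int)
  -- LABELS[best]; best is always a valid index, the .getD guard only totalizes the lookup
  (PySem.List.pyGet? pvLabels best).getD ""

-- ===== PRECONDITION & SPEC =====
def Spec_mapear_categoria (cat : String) (out : String) : Prop := out = mapear_categoria_alt cat
instance (cat : String) (out : String) : Decidable (Spec_mapear_categoria cat out) := by unfold Spec_mapear_categoria; infer_instance

-- ===== CLAIM (what is proved, stated in full; the proofs are below) =====
def Claim_equal_mapear_categoria : Prop := ∀ (cat : String), Dom_mapear_categoria cat → Spec_mapear_categoria cat (mapear_categoria cat)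

-- ===== LEMMAS AND PROOFS =====

lemma mem_pvKwPrio_of (k : Nat) (hk : k < pvGroups.length) (kw : String)
    (hkw : kw ∈ pvGroups[k]) : (kw, (k : Int)) ∈ pvKwPrio := by
  unfold pvKwPrio
  rw [List.mem_flatMap]
  refine ⟨((k : Int), pvGroups[k]), ?_, ?_⟩
  · rw [PySem.List.mem_enumerate_iff]
    exact ⟨k, hk, by simp⟩
  · simp only [List.mem_map]
    exact ⟨kw, hkw, rfl⟩

lemma pvKwPrio_bound (kp : String × Int) (h : kp ∈ pvKwPrio) :
    ∃ (k : Nat) (hk : k < pvGroups.length), kp.2 = (k : Int) ∧ kp.1 ∈ pvGroups[k] := by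
  unfold pvKwPrio at h
  rw [List.mem_flatMap] at h
  obtain ⟨pk, hpk, hm⟩ := h
  rw [PySem.List.mem_enumerate_iff] at hpk
  obtain ⟨k, hk, rfl⟩ := hpk
  simp only [List.mem_map] at hm
  obtain ⟨kw, hkw, rfl⟩ := hm
  exact ⟨k, hk, by simp, hkw⟩

lemma min_hits (c : String) (k : Nat) (hk : k < pvGroups.length)
    (hlow : ∀ (j : Nat) (hj : j < pvGroups.length), j < k →
      (pvGroups[j]).any (fun x => PySem.Str.isIn x c) = false)
    (hhit : (pvGroups[k]).any (fun x => PySem.Str.isIn x c) = true) :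
    PySem.List.min? (pvKwPrio.filterMap
      (fun kp => if PySem.Str.isIn kp.1 c then some kp.2 else none)) (fun p => p)
      = some (k : Int) := by
  set hits := pvKwPrio.filterMap (fun kp => if PySem.Str.isIn kp.1 c then some kp.2 else none) with hhits
  obtain ⟨kw, hkwmem, hkwin⟩ := List.any_eq_true.mp hhit
  have hmemk : (k : Int) ∈ hits := by
    rw [hhits, List.mem_filterMap]
    exact ⟨(kw, (k : Int)), mem_pvKwPrio_of k hk kw hkwmem, by rw [if_pos hkwin]⟩
  have hne : hits ≠ [] := fun h => by simp [h] at hmemk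
  obtain ⟨m, hm⟩ : ∃ m, PySem.List.min? hits (fun p => p) = some m := by
    cases hmo : PySem.List.min? hits (fun p => p) with
    | none => exact absurd ((PySem.List.min?_eq_none_iff hits (fun p => p)).mp hmo) hne
    | some m => exact ⟨m, rfl⟩
  have hle : m ≤ (k : Int) := PySem.List.min?_isMin hm _ hmemk
  have hmm : m ∈ hits := PySem.List.min?_mem hm
  rw [hhits, List.mem_filterMap] at hmm
  obtain ⟨kp, hkpmem, hkpeq⟩ := hmm
  have hin : PySem.Str.isIn kp.1 c = true ∧ kp.2 = m := by
    by_cases hc : PySem.Str.isIn kp.1 c = true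
    · rw [if_pos hc] at hkpeq; exact ⟨hc, Option.some.inj hkpeq⟩
    · rw [if_neg hc] at hkpeq; cases hkpeq
  obtain ⟨j, hj, hj2, hj1⟩ := pvKwPrio_bound kp hkpmem
  have : ¬ j < k := by
    intro hjk
    have := hlow j hj hjk
    rw [List.any_eq_false] at this
    exact absurd hin.1 (by simpa using this kp.1 hj1)
  have : (k : Int) ≤ m := by
    rw [← hin.2, hj2]; omega
  rw [hm]
  congr 1
  omega
lemma no_hits (c : String)
    (hall : ∀ (j : Nat) (hj : j < pvGroups.length),
      (pvGroups[j]).any (fun x => PySem.Str.isIn x c) = false) :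
    pvKwPrio.filterMap (fun kp => if PySem.Str.isIn kp.1 c then some kp.2 else none) = [] := by
  rw [List.filterMap_eq_nil_iff]
  intro kp hkp
  obtain ⟨j, hj, hj2, hj1⟩ := pvKwPrio_bound kp hkp
  have hja := hall j hj
  rw [List.any_eq_false] at hja
  rw [if_neg (by simpa using hja kp.1 hj1)]

-- ===== VERDICT (by name: the statement is the Claim_ definition above) =====
theorem mapear_categoria_spec : Claim_equal_mapear_categoria := by
  intro cat _
  show mapear_categoria cat = mapear_categoria_alt cat
  simp only [mapear_categoria, mapear_categoria_alt]
  set c := PySem.Str.lower cat with hc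

  by_cases h0 : ((["xenofobia", "inmigrante", "moro", "inmigra", "extranjero"] : List String).any (fun x => PySem.Str.isIn x c)) = true
  · have hmin := min_hits c 0 (by simp [pvGroups]) (by
      intro j hj hjk
      exact absurd hjk (by omega)) (h0)
    simp only [h0, if_true, hmin]
    rfl

  by_cases h1 : ((["racis", "negro", "étnico", "racial"] : List String).any (fun x => PySem.Str.isIn x c)) = true
  · have hmin := min_hits c 1 (by simp [pvGroups]) (by
      intro j hj hjk
      interval_cases j
      · exact (Bool.not_eq_true _).mp h0) (h1)
    simp only [h1, if_true, hmin]
    simp only [h0, Bool.false_eq_true, if_false]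
    decide

  by_cases h2 : ((["homofob", "gay", "maric", "lgbtq", "orientación sexual"] : List String).any (fun x => PySem.Str.isIn x c)) = true
  · have hmin := min_hits c 2 (by simp [pvGroups]) (by
      intro j hj hjk
      interval_cases j
      · exact (Bool.not_eq_true _).mp h0
      · exact (Bool.not_eq_true _).mp h1) (h2)
    simp only [h2, if_true, hmin]
    simp only [h0, h1, Bool.false_eq_true, if_false]
    decide

  by_cases h3 : ((["misoginia", "sexis", "género", "feminista", "mujer"] : List String).any (fun x => PySem.Str.isIn x c)) = true
  · have hmin := min_hits c 3 (by simp [pvGroups]) (by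
      intro j hj hjk
      interval_cases j
      · exact (Bool.not_eq_true _).mp h0
      · exact (Bool.not_eq_true _).mp h1
      · exact (Bool.not_eq_true _).mp h2) (h3)
    simp only [h3, if_true, hmin]
    simp only [h0, h1, h2, Bool.false_eq_true, if_false]
    decide

  by_cases h4 : ((["polític", "ideológ", "zurdo", "facha", "comunis"] : List String).any (fun x => PySem.Str.isIn x c)) = true
  · have hmin := min_hits c 4 (by simp [pvGroups]) (by
      intro j hj hjk
      interval_cases j
      · exact (Bool.not_eq_true _).mp h0
      · exact (Bool.not_eq_true _).mp h1
      · exact (Bool.not_eq_true _).mp h2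
      · exact (Bool.not_eq_true _).mp h3) (h4)
    simp only [h4, if_true, hmin]
    simp only [h0, h1, h2, h3, Bool.false_eq_true, if_false]
    decide

  by_cases h5 : ((["muslim", "islam", "religión", "judío"] : List String).any (fun x => PySem.Str.isIn x c)) = true
  · have hmin := min_hits c 5 (by simp [pvGroups]) (by
      intro j hj hjk
      interval_cases j
      · exact (Bool.not_eq_true _).mp h0
      · exact (Bool.not_eq_true _).mp h1
      · exact (Bool.not_eq_true _).mp h2
      · exact (Bool.not_eq_true _).mp h3
      · exact (Bool.not_eq_true _).mp h4) (h5)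
    simp only [h5, if_true, hmin]
    simp only [h0, h1, h2, h3, h4, Bool.false_eq_true, if_false]
    decide

  by_cases h6 : ((["insult", "hostilidad", "no dirigido"] : List String).any (fun x => PySem.Str.isIn x c)) = true
  · have hmin := min_hits c 6 (by simp [pvGroups]) (by
      intro j hj hjk
      interval_cases j
      · exact (Bool.not_eq_true _).mp h0
      · exact (Bool.not_eq_true _).mp h1
      · exact (Bool.not_eq_true _).mp h2
      · exact (Bool.not_eq_true _).mp h3
      · exact (Bool.not_eq_true _).mp h4
      · exact (Bool.not_eq_true _).mp h5) (h6)
    simp only [h6, if_true, hmin]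
    simp only [h0, h1, h2, h3, h4, h5, Bool.false_eq_true, if_false]
    decide

  by_cases h7 : ((["capacit", "discapacidad", "retrasado", "mental"] : List String).any (fun x => PySem.Str.isIn x c)) = true
  · have hmin := min_hits c 7 (by simp [pvGroups]) (by
      intro j hj hjk
      interval_cases j
      · exact (Bool.not_eq_true _).mp h0
      · exact (Bool.not_eq_true _).mp h1
      · exact (Bool.not_eq_true _).mp h2
      · exact (Bool.not_eq_true _).mp h3
      · exact (Bool.not_eq_true _).mp h4
      · exact (Bool.not_eq_true _).mp h5
      · exact (Bool.not_eq_true _).mp h6) (h7)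
    simp only [h7, if_true, hmin]
    simp only [h0, h1, h2, h3, h4, h5, h6, Bool.false_eq_true, if_false]
    decide

  by_cases h8 : ((["nacionalidad", "español", "catalán", "vasco"] : List String).any (fun x => PySem.Str.isIn x c)) = true
  · have hmin := min_hits c 8 (by simp [pvGroups]) (by
      intro j hj hjk
      interval_cases j
      · exact (Bool.not_eq_true _).mp h0
      · exact (Bool.not_eq_true _).mp h1
      · exact (Bool.not_eq_true _).mp h2
      · exact (Bool.not_eq_true _).mp h3
      · exact (Bool.not_eq_true _).mp h4
      · exact (Bool.not_eq_true _).mp h5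
      · exact (Bool.not_eq_true _).mp h6
      · exact (Bool.not_eq_true _).mp h7) (h8)
    simp only [h8, if_true, hmin]
    simp only [h0, h1, h2, h3, h4, h5, h6, h7, Bool.false_eq_true, if_false]
    decide

  have hempty := no_hits c (by
    intro j hj
    have hj9 : j < 9 := by simpa [pvGroups] using hj
    interval_cases j
    · exact (Bool.not_eq_true _).mp h0
    · exact (Bool.not_eq_true _).mp h1
    · exact (Bool.not_eq_true _).mp h2
    · exact (Bool.not_eq_true _).mp h3
    · exact (Bool.not_eq_true _).mp h4
    · exact (Bool.not_eq_true _).mp h5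
    · exact (Bool.not_eq_true _).mp h6
    · exact (Bool.not_eq_true _).mp h7
    · exact (Bool.not_eq_true _).mp h8)
  rw [hempty]
  simp only [h0, h1, h2, h3, h4, h5, h6, h7, h8, Bool.false_eq_true, if_false]
  decide
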